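-- pv_equiv track=rewrite | github.com/RoberAlcaraz/ProgrammingExpert-course | 2-ProgrammingFundamentals/4_longest_unique_words.py | get_n_longest_unique_words
-- ===== SOURCE A (Python) =====
-- def get_n_longest_unique_words(words, n):
--     counted_words = [words.count(word) for word in words]
--     unique_list = []
--
--     for i in range(len(counted_words)):
--
--         if counted_words[i] == 1:
--
--             unique_list.append(words[i])
--
--     sorted_list = sorted(unique_list, key=lambda x: len(x), reverse=True)
--     return sorted_list[:n]
-- ===== SOURCE B (Python) =====
-- def get_n_longest_unique_words(words, n):
--     counts = {}
--     for w in words: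
--         counts[w] = counts.get(w, 0) + 1
--     buckets = {}
--     for w in words:
--         if counts[w] == 1:
--             buckets.setdefault(len(w), []).append(w)
--     result = []
--     for length in sorted(buckets, reverse=True):
--         result += buckets[length]
--     return result[:n]
-- ===== Notes on version B (the rewrite author's own statement) =====
-- stated objective: faster
-- what changed: Replaces the quadratic per-word words.count scan and the comparison sort of the unique words by a one-pass dict frequency count plus length-bucketing, sorting only the distinct lengths.
import Mathlib
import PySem

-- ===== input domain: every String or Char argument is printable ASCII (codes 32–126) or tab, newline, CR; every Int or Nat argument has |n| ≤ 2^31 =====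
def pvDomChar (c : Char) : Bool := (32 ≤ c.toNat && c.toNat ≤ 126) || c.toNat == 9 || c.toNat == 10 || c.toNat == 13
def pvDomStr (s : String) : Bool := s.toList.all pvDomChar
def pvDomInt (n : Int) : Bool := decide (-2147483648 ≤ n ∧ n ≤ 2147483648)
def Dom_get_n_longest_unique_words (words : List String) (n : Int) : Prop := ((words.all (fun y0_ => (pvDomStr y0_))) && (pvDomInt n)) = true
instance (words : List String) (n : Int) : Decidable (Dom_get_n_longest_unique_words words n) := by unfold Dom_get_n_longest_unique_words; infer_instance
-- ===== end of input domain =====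

-- B replaces A's quadratic words.count scan and full sort of the unique words by a one-pass
-- dict frequency count and length-buckets, sorting only the distinct lengths (objective: faster).

-- ===== PORT A =====
def get_n_longest_unique_words (words : List String) (n : Int) : List String :=
  let counted_words := words.map (fun word => PySem.List.count words word)
  let unique_list := (PySem.List.pyRange 0 (PySem.List.len counted_words)).foldl
    (fun acc i =>
      -- counted_words[i] / words[i]: i ranges over range(len(counted_words)), always in range,
      -- so the total pyGetD form is exact here
      if PySem.List.pyGetD counted_words i 0 == 1 then acc ++ [PySem.List.pyGetD words i ""]
      else acc) []
  let sorted_list := PySem.List.sorted unique_list (fun x => PySem.Str.len x) true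
  PySem.List.slice sorted_list none (some n)

-- ===== PORT B =====
def get_n_longest_unique_words_alt (words : List String) (n : Int) : List String :=
  let counts := words.foldl (fun d w => d.insert w (d.getD w 0 + 1)) (PySem.Dict.empty : PySem.Dict String Int)
  let buckets := words.foldl
    (fun d w =>
      if counts.getD w 0 == 1 then d.modify (PySem.Str.len w) [] (fun l => l ++ [w]) else d)
    (PySem.Dict.empty : PySem.Dict Int (List String))
  let result := (PySem.List.sorted buckets.keys (fun k => k) true).foldl
    -- buckets[length]: length is always a key of buckets, so getD is exact
    (fun acc length => acc ++ buckets.getD length []) []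
  PySem.List.slice result none (some n)

-- ===== PRECONDITION & SPEC =====
def Spec_get_n_longest_unique_words (words : List String) (n : Int) (out : List String) : Prop := out = get_n_longest_unique_words_alt words n
instance (words : List String) (n : Int) (out : List String) : Decidable (Spec_get_n_longest_unique_words words n out) := by unfold Spec_get_n_longest_unique_words; infer_instance

-- ===== CLAIM (what is proved, stated in full; the proofs are below) =====
def Claim_equal_get_n_longest_unique_words : Prop := ∀ (words : List String) (n : Int), Dom_get_n_longest_unique_words words n → Spec_get_n_longest_unique_words words n (get_n_longest_unique_words words n)

-- ===== LEMMAS AND PROOFS =====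

-- insertion order used by sorted(…, key=len, reverse=True)
def pvBef (x y : String) : Bool := decide (PySem.Str.len y < PySem.Str.len x)

-- insert a fresh key into a strictly descending key list
def pvInsDesc (ks : List Int) (v : Int) : List Int :=
  match ks with
  | [] => [v]
  | k :: t => if v < k then k :: pvInsDesc t v else v :: k :: t

lemma pvIb_nil {α : Type} (before : α → α → Bool) (x : α) :
    PySem.List.insertBy before x [] = [x] := rfl

lemma pvIb_cons {α : Type} (before : α → α → Bool) (x y : α) (ys : List α) :
    PySem.List.insertBy before x (y :: ys) =
      if before x y then x :: y :: ys else y :: PySem.List.insertBy before x ys := rfl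

lemma pvIb_skip {α : Type} (before : α → α → Bool) (x : α) (a b : List α)
    (h : ∀ y ∈ a, before x y = false) :
    PySem.List.insertBy before x (a ++ b) = a ++ PySem.List.insertBy before x b := by
  induction a with
  | nil => simp
  | cons y t ih =>
      simp only [List.cons_append, pvIb_cons, h y (by simp)]
      simp [ih (fun z hz => h z (by simp [hz]))]

lemma pvIb_front {α : Type} (before : α → α → Bool) (x : α) (b : List α)
    (h : ∀ y ∈ b, before x y = true) :
    PySem.List.insertBy before x b = x :: b := by
  cases b with
  | nil => rfl
  | cons y t => simp [pvIb_cons, h y (by simp)]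

lemma pvFlatMap_congr {α β : Type} (l : List α) (f g : α → List β)
    (h : ∀ x ∈ l, f x = g x) : l.flatMap f = l.flatMap g := by
  induction l with
  | nil => rfl
  | cons a t ih =>
      simp only [List.flatMap_cons, h a (by simp), ih (fun x hx => h x (by simp [hx]))]

lemma pvGrouped_mem (ks : List Int) (g : Int → List String) (x : String) (v : Int)
    (hx : PySem.Str.len x = v)
    (hks : ks.Pairwise (· > ·))
    (hg : ∀ k ∈ ks, ∀ w ∈ g k, PySem.Str.len w = k)
    (hmem : v ∈ ks) :
    PySem.List.insertBy pvBef x (ks.flatMap g) =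
      ks.flatMap (fun k => if k = v then g k ++ [x] else g k) := by
  induction ks with
  | nil => simp at hmem
  | cons k t ih =>
      rcases List.pairwise_cons.mp hks with ⟨hk, ht⟩
      by_cases hkx : k = v
      · rw [List.flatMap_cons,
          pvIb_skip pvBef x (g k) (t.flatMap g)
            (fun y hy => by
              have h3 := hg k (by simp) y hy
              simp only [pvBef, decide_eq_false_iff_not]
              rw [h3, hkx, hx]; exact lt_irrefl _),
          pvIb_front pvBef x (t.flatMap g)
            (fun y hy => by
              rcases List.mem_flatMap.mp hy with ⟨k', hk', hy'⟩
              have h2 := hk k' hk'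
              have h3 := hg k' (by simp [hk']) y hy'
              simp only [pvBef, decide_eq_true_eq]
              rw [h3, hx, ← hkx]; exact h2)]
        have ht' : List.flatMap (fun k' => if k' = v then g k' ++ [x] else g k') t
            = List.flatMap g t :=
          pvFlatMap_congr _ _ _ (fun k' hk' => by
            have := hk k' hk'
            have hne : k' ≠ v := by omega
            simp [hne])
        rw [List.flatMap_cons, if_pos hkx, ht']
        simp
      · have hmem' : v ∈ t := by
          rcases List.mem_cons.mp hmem with h1 | h1
          · exact absurd h1.symm hkx
          · exact h1
        have hklt : v < k := hk _ hmem'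
        rw [List.flatMap_cons,
          pvIb_skip pvBef x (g k) (t.flatMap g)
            (fun y hy => by
              have h3 := hg k (by simp) y hy
              simp only [pvBef, decide_eq_false_iff_not]
              rw [h3, hx]; omega),
          ih ht (fun k' hk' w hw => hg k' (by simp [hk']) w hw) hmem']
        rw [List.flatMap_cons, if_neg hkx]

lemma pvGrouped_not_mem (ks : List Int) (g : Int → List String) (x : String) (v : Int)
    (hx : PySem.Str.len x = v)
    (hks : ks.Pairwise (· > ·))
    (hg : ∀ k ∈ ks, ∀ w ∈ g k, PySem.Str.len w = k)
    (hmem : v ∉ ks) :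
    PySem.List.insertBy pvBef x (ks.flatMap g) =
      (pvInsDesc ks v).flatMap (fun k => if k = v then [x] else g k) := by
  induction ks with
  | nil => simp [pvInsDesc, pvIb_nil]
  | cons k t ih =>
      rcases List.pairwise_cons.mp hks with ⟨hk, ht⟩
      have hkx : k ≠ v := fun h => hmem (h ▸ List.mem_cons_self ..)
      simp only [pvInsDesc]
      by_cases hlt : v < k
      · rw [if_pos hlt, List.flatMap_cons,
          pvIb_skip pvBef x (g k) (t.flatMap g)
            (fun y hy => by
              have h3 := hg k (by simp) y hy
              simp only [pvBef, decide_eq_false_iff_not]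
              rw [h3, hx]; omega),
          ih ht (fun k' hk' w hw => hg k' (by simp [hk']) w hw)
            (fun h => hmem (List.mem_cons_of_mem _ h))]
        rw [List.flatMap_cons, if_neg hkx]
      · have hklt : k < v := by omega
        rw [if_neg hlt,
          pvIb_front pvBef x ((k :: t).flatMap g)
            (fun y hy => by
              rcases List.mem_flatMap.mp hy with ⟨k', hk', hy'⟩
              have hle : k' ≤ k := by
                rcases List.mem_cons.mp hk' with h1 | h1
                · omega
                · have := hk k' h1; omega
              have h3 := hg k' hk' y hy'
              simp only [pvBef, decide_eq_true_eq]
              rw [h3, hx]; omega)]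
        have ht' : List.flatMap (fun k' => if k' = v then [x] else g k') t
            = List.flatMap g t :=
          pvFlatMap_congr _ _ _ (fun k' hk' => by
            have h1 := hk k' hk'
            have hne : k' ≠ v := by omega
            simp [hne])
        simp only [List.flatMap_cons]
        rw [if_neg hkx, ht']
        simp

lemma pvInsDesc_perm (ks : List Int) (v : Int) : (pvInsDesc ks v).Perm (v :: ks) := by
  induction ks with
  | nil => simp [pvInsDesc]
  | cons k t ih =>
      simp only [pvInsDesc]
      split
      · exact ((ih.cons k).trans (List.Perm.swap v k t)).symm.symm
      · exact List.Perm.refl _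

lemma pvInsDesc_pairwise (ks : List Int) (v : Int) (hks : ks.Pairwise (· > ·))
    (hv : v ∉ ks) : (pvInsDesc ks v).Pairwise (· > ·) := by
  induction ks with
  | nil => simp [pvInsDesc]
  | cons k t ih =>
      simp only [pvInsDesc]
      rcases List.pairwise_cons.mp hks with ⟨hk, ht⟩
      split
      · rename_i hlt
        refine List.pairwise_cons.mpr ⟨?_, ih ht (by simp at hv; tauto)⟩
        intro b hb
        have hb' : b ∈ v :: t := (pvInsDesc_perm t v).mem_iff.mp hb
        rcases List.mem_cons.mp hb' with h1 | h1
        · subst h1; omega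
        · exact hk b h1
      · rename_i hnlt
        have hne : v ≠ k := by simp at hv; tauto
        refine List.pairwise_cons.mpr ⟨?_, hks⟩
        intro b hb
        rcases List.mem_cons.mp hb with h1 | h1
        · subst h1; omega
        · have := hk b h1; omega

-- the heart: a stable reverse sort by length is the concatenation of the length buckets,
-- over the distinct lengths in decreasing order
lemma pvSorted_eq_buckets (xs : List String) :
    PySem.List.sorted xs (fun x => PySem.Str.len x) true =
      (PySem.List.sorted (PySem.Set.ofList (xs.map PySem.Str.len)) (fun k => k) true).flatMap
        (fun c => xs.filter (fun w => PySem.Str.len w == c)) := by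
  induction xs using List.reverseRecOn with
  | nil =>
      rw [(PySem.List.sorted_eq_nil_iff _ _ _).mpr rfl]
      simp [PySem.Set.ofList, (PySem.List.sorted_eq_nil_iff _ _ _).mpr rfl]
  | append_singleton xs x ih =>
      have hstep : PySem.List.sorted (xs ++ [x]) (fun x => PySem.Str.len x) true =
          PySem.List.insertBy pvBef x (PySem.List.sorted xs (fun x => PySem.Str.len x) true) := by
        rw [PySem.List.sorted_rev_eq_foldl_insertBy, PySem.List.sorted_rev_eq_foldl_insertBy,
          List.foldl_append]
        rfl
      have hSks := PySem.List.sorted_perm (PySem.Set.ofList (xs.map PySem.Str.len)) (fun k => k) true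
      have hnd : (PySem.List.sorted (PySem.Set.ofList (xs.map PySem.Str.len)) (fun k => k) true).Nodup :=
        hSks.nodup_iff.mpr (PySem.Set.nodup_ofList _)
      have hks : (PySem.List.sorted (PySem.Set.ofList (xs.map PySem.Str.len)) (fun k => k) true).Pairwise (· > ·) :=
        ((PySem.List.sorted_pairwise_rev _ _).and hnd).imp (fun h => by
          rcases h with ⟨h1, h2⟩; omega)
      have hg : ∀ k ∈ PySem.List.sorted (PySem.Set.ofList (xs.map PySem.Str.len)) (fun k => k) true,
          ∀ w ∈ xs.filter (fun w => PySem.Str.len w == k), PySem.Str.len w = k :=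
        fun k _ w hw => beq_iff_eq.mp (List.mem_filter.mp hw).2
      have hbucket : ∀ k, (xs ++ [x]).filter (fun w => PySem.Str.len w == k) =
          xs.filter (fun w => PySem.Str.len w == k) ++
            (if PySem.Str.len x = k then [x] else []) := by
        intro k
        rw [List.filter_append]
        congr 1
        simp only [List.filter_cons, List.filter_nil]
        rcases eq_or_ne (PySem.Str.len x) k with h | h
        · rw [if_pos (beq_iff_eq.mpr h), if_pos h]
        · rw [if_neg (fun hc => h (beq_iff_eq.mp hc)), if_neg h]
      rw [hstep, ih]
      by_cases hv : PySem.Str.len x ∈ PySem.Set.ofList (xs.map PySem.Str.len)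
      · have hS' : PySem.Set.ofList ((xs ++ [x]).map PySem.Str.len) =
            PySem.Set.ofList (xs.map PySem.Str.len) := by
          rw [List.map_append, PySem.Set.ofList_eq_foldl, List.foldl_append,
            ← PySem.Set.ofList_eq_foldl]
          have hc : PySem.Set.contains (PySem.Set.ofList (xs.map PySem.Str.len))
              (PySem.Str.len x) = true := by simpa [PySem.Set.contains] using hv
          simp only [List.map_cons, List.map_nil, List.foldl_cons, List.foldl_nil, PySem.Set.add, hc, if_true]
        rw [hS', pvGrouped_mem _ _ x (PySem.Str.len x) rfl hks hg (hSks.mem_iff.mpr hv)]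
        refine pvFlatMap_congr _ _ _ (fun k hk => ?_)
        rw [hbucket k]
        by_cases h : k = PySem.Str.len x
        · rw [if_pos h, if_pos h.symm]
        · rw [if_neg h, if_neg (fun h' => h h'.symm)]
          simp
      · have hS' : PySem.Set.ofList ((xs ++ [x]).map PySem.Str.len) =
            PySem.Set.ofList (xs.map PySem.Str.len) ++ [PySem.Str.len x] := by
          rw [List.map_append, PySem.Set.ofList_eq_foldl, List.foldl_append,
            ← PySem.Set.ofList_eq_foldl]
          have hc : PySem.Set.contains (PySem.Set.ofList (xs.map PySem.Str.len))
              (PySem.Str.len x) = false := by simpa [PySem.Set.contains] using hv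
          simp only [List.map_cons, List.map_nil, List.foldl_cons, List.foldl_nil, PySem.Set.add, hc, Bool.false_eq_true, if_false]
        have hvks : PySem.Str.len x ∉
            PySem.List.sorted (PySem.Set.ofList (xs.map PySem.Str.len)) (fun k => k) true :=
          fun h => hv (hSks.mem_iff.mp h)
        have hsorted' : PySem.List.sorted
            (PySem.Set.ofList (xs.map PySem.Str.len) ++ [PySem.Str.len x]) (fun k => k) true =
            pvInsDesc (PySem.List.sorted (PySem.Set.ofList (xs.map PySem.Str.len)) (fun k => k) true)
              (PySem.Str.len x) :=
          PySem.List.sorted_rev_eq_of_perm_of_pairwise_gt _ _ _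
            ((pvInsDesc_perm _ _).trans
              ((hSks.cons (PySem.Str.len x)).trans (List.perm_append_singleton _ _).symm))
            (pvInsDesc_pairwise _ _ hks hvks)
        have hempty : xs.filter (fun w => PySem.Str.len w == PySem.Str.len x) = [] := by
          rw [List.filter_eq_nil_iff]
          intro w hw hbeq
          exact hv ((PySem.Set.mem_ofList _ _).mpr
            (List.mem_map.mpr ⟨w, hw, beq_iff_eq.mp hbeq⟩))
        rw [hS', hsorted', pvGrouped_not_mem _ _ x (PySem.Str.len x) rfl hks hg hvks]
        refine pvFlatMap_congr _ _ _ (fun k hk => ?_)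
        rw [hbucket k]
        by_cases h : k = PySem.Str.len x
        · rw [if_pos h, if_pos h.symm, h, hempty]
          simp
        · rw [if_neg h, if_neg (fun h' => h h'.symm)]
          simp

-- A's unique-word list: the words occurring exactly once, in original order
def pvUniq (words : List String) : List String :=
  words.filter (fun w => PySem.List.count words w == 1)

lemma pvA_eq (words : List String) (n : Int) :
    get_n_longest_unique_words words n =
      PySem.List.slice
        (PySem.List.sorted (pvUniq words) (fun x => PySem.Str.len x) true) none (some n) := by
  simp only [get_n_longest_unique_words]
  congr 2
  rw [PySem.List.foldl_congr_mem _ _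
    (fun acc j => if PySem.List.count words (PySem.List.pyGetD words j "") == 1
      then acc ++ [PySem.List.pyGetD words j ""] else acc) _
    (by
      intro acc i hi
      have hmem := PySem.List.mem_pyRange_one.mp hi
      have h0 : 0 ≤ i := hmem.1
      have hlt : i < (words.length : Int) := by
        have := hmem.2
        simpa using this
      have hik : i = ((i.toNat : Nat) : Int) := (Int.toNat_of_nonneg h0).symm
      have hk : i.toNat < words.length := by omega
      simp only []
      rw [hik, PySem.List.pyGetD_natCast, PySem.List.pyGetD_natCast,
        List.getD_eq_getElem _ _ (by simpa using hk),
        List.getD_eq_getElem _ _ hk, List.getElem_map])]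
  have hlen : PySem.List.len (words.map (fun word => PySem.List.count words word)) =
      PySem.List.len words := by simp
  rw [hlen,
    PySem.List.foldl_pyRange_zero_pyGetD words ""
      (fun acc w => if PySem.List.count words w == 1 then acc ++ [w] else acc) [],
    PySem.List.foldl_append_if_eq_filter]
  rfl

lemma pvB_eq (words : List String) (n : Int) :
    get_n_longest_unique_words_alt words n =
      PySem.List.slice
        ((PySem.List.sorted (PySem.Set.ofList ((pvUniq words).map PySem.Str.len))
            (fun k => k) true).flatMap
          (fun c => (pvUniq words).filter (fun w => PySem.Str.len w == c))) none (some n) := by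
  simp only [get_n_longest_unique_words_alt]
  have hpred : ∀ w : String,
      ((words.foldl (fun d w => d.insert w (d.getD w 0 + 1))
          (PySem.Dict.empty : PySem.Dict String Int)).getD w 0 == 1)
        = (PySem.List.count words w == 1) := by
    intro w
    rw [PySem.Dict.getD_foldl_insert_add_one]
    simp [PySem.List.count_eq]
  have hfilter : words.filter
      (fun w => (words.foldl (fun d w => d.insert w (d.getD w 0 + 1))
          (PySem.Dict.empty : PySem.Dict String Int)).getD w 0 == 1)
        = pvUniq words :=
    List.filter_congr (fun w _ => hpred w)
  have hiff := PySem.List.foldl_if_eq_foldl_filter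
    (fun w => ((words.foldl (fun d w => d.insert w (d.getD w 0 + 1))
        (PySem.Dict.empty : PySem.Dict String Int)).getD w 0 == 1))
    (fun (d : PySem.Dict Int (List String)) w =>
      d.modify (PySem.Str.len w) [] (fun l => l ++ [w]))
    words PySem.Dict.empty
  rw [hiff, hfilter]
  have hbuckets : ((pvUniq words).foldl
      (fun d w => d.modify (PySem.Str.len w) [] (fun l => l ++ [w])) PySem.Dict.empty)
        = ((pvUniq words).map (fun w => (PySem.Str.len w, w))).foldl
            (fun d p => d.modify p.1 [] (fun l => l ++ [p.2])) PySem.Dict.empty := by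
    rw [List.foldl_map]
  rw [hbuckets]
  have hkeys : (((pvUniq words).map (fun w => (PySem.Str.len w, w))).foldl
      (fun d p => d.modify p.1 [] (fun l => l ++ [p.2])) PySem.Dict.empty).keys
        = PySem.Set.ofList ((pvUniq words).map PySem.Str.len) := by
    have hk := PySem.Dict.keys_foldl_modify_key (pvUniq words) PySem.Str.len []
      (fun (_ : PySem.Dict Int (List String)) (w : String) => (fun l => l ++ [w]))
      PySem.Dict.empty
    rw [← hbuckets, hk, PySem.Set.ofList_eq_foldl]
    rfl
  have hgetD : ∀ c : Int, (((pvUniq words).map (fun w => (PySem.Str.len w, w))).foldl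
      (fun d p => d.modify p.1 [] (fun l => l ++ [p.2])) PySem.Dict.empty).getD c []
        = (pvUniq words).filter (fun w => PySem.Str.len w == c) := by
    intro c
    rw [PySem.Dict.getD_foldl_modify_append]
    simp [List.filter_map, Function.comp_def]
  rw [hkeys,
    PySem.List.foldl_congr_mem _ _
      (fun acc c => acc ++ (pvUniq words).filter (fun w => PySem.Str.len w == c)) _
      (fun acc c _ => by rw [hgetD c]),
    PySem.List.foldl_append_eq_flatMap]
  rfl

-- ===== VERDICT (by name: the statement is the Claim_ definition above) =====
theorem get_n_longest_unique_words_spec : Claim_equal_get_n_longest_unique_words := by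
  intro words n _
  unfold Spec_get_n_longest_unique_words
  rw [pvA_eq, pvB_eq, pvSorted_eq_buckets]
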